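-- pv_equiv track=rewrite | github.com/gallen881/Izumi-Yui | func/modifyinput.py | IsZhInput
-- ===== SOURCE A (Python) =====
-- def IsZhInput(words):
--     bpmf = [49, 113, 97, 122, 50, 119, 115, 120, 101, 100, 99, 114, 102, 118, 53, 116, 103, 98, 121, 104, 110]
--     iwu = [117, 106, 109]
--     aouh = [56, 105, 107, 44, 57, 111, 108, 46, 48, 112, 59, 47]
--     tone = [32, 54, 51, 52, 55]
--
--     words = [ord(word) for word in words]
--     if len(words) == 2:
--         if words[0] in [53, 116, 103, 98, 121, 104, 110, 117, 106, 109, 56, 105, 107, 44, 57, 111, 108, 46, 48, 112, 59, 45]: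
--             if words[1] in tone:
--                 return True
--     if len(words) == 3:
--         if (words[0] in bpmf) and (words[1] in iwu + aouh) and (words[2] in tone):
--             return True
--     if len(words) == 3:
--         if (words[0] in iwu) and (words[1] in aouh) and (words[2] in tone):
--             return True
--     if len(words) == 4:
--         if (words[0] in bpmf) and (words[1] in iwu) and (words[2] in aouh) and (words[3] in tone):
--             return True
--     return False
-- ===== SOURCE B (Python) =====
-- def IsZhInput(words):
--     bpmf = [49, 113, 97, 122, 50, 119, 115, 120, 101, 100, 99, 114, 102, 118, 53, 116, 103, 98, 121, 104, 110]
--     iwu = [117, 106, 109]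
--     aouh = [56, 105, 107, 44, 57, 111, 108, 46, 48, 112, 59, 47]
--     tone = [32, 54, 51, 52, 55]
--     len2 = [53, 116, 103, 98, 121, 104, 110, 117, 106, 109, 56, 105, 107, 44, 57, 111, 108, 46, 48, 112, 59, 45]
--     # NFA simulation: reqs holds the remaining per-position requirements of every
--     # still-viable pattern; each character filters and advances them in one pass.
--     reqs = [
--         [len2, tone],
--         [bpmf, iwu + aouh, tone],
--         [iwu, aouh, tone],
--         [bpmf, iwu, aouh, tone],
--     ]
--     for ch in words:
--         o = ord(ch)
--         reqs = [r[1:] for r in reqs if r and o in r[0]]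
--     return any(not r for r in reqs)
-- ===== Notes on version B (the rewrite author's own statement) =====
-- stated objective: alternative
-- what changed: Replaces A's chain of length checks with nested membership ifs by an NFA simulation: the four patterns become per-position requirement lists and one left-to-right pass over the characters filters and advances the set of still-viable patterns (Brzozowski-derivative style), accepting iff some requirement is exhausted at the end.
import Mathlib
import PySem

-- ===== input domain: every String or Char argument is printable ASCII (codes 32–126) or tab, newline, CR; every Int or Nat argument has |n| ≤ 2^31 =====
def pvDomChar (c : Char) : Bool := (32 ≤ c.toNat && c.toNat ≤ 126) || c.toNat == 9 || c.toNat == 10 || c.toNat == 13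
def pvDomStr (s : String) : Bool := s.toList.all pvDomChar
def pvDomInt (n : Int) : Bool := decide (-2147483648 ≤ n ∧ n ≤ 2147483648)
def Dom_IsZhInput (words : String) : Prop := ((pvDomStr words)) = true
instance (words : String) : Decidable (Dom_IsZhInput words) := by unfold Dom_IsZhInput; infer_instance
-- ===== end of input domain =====

-- B replaces A's chain of length/membership branches by a single left-to-right NFA
-- simulation over per-position requirement lists (objective: alternative).

-- ===== PORT A =====
-- literal transliteration of A: ordinal list, then the four guarded early returns in order
def IsZhInput (words : String) : Bool :=
  let bpmf : List Int := [49, 113, 97, 122, 50, 119, 115, 120, 101, 100, 99, 114, 102, 118, 53, 116, 103, 98, 121, 104, 110]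
  let iwu : List Int := [117, 106, 109]
  let aouh : List Int := [56, 105, 107, 44, 57, 111, 108, 46, 48, 112, 59, 47]
  let tone : List Int := [32, 54, 51, 52, 55]
  let ws : List Int := words.toList.map (fun c => (c.toNat : Int))
  if ws.length = 2 ∧ ws.getD 0 0 ∈ ([53, 116, 103, 98, 121, 104, 110, 117, 106, 109, 56, 105, 107, 44, 57, 111, 108, 46, 48, 112, 59, 45] : List Int)
      ∧ ws.getD 1 0 ∈ tone then true
  else if ws.length = 3 ∧ ws.getD 0 0 ∈ bpmf ∧ ws.getD 1 0 ∈ iwu ++ aouh ∧ ws.getD 2 0 ∈ tone then true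
  else if ws.length = 3 ∧ ws.getD 0 0 ∈ iwu ∧ ws.getD 1 0 ∈ aouh ∧ ws.getD 2 0 ∈ tone then true
  else if ws.length = 4 ∧ ws.getD 0 0 ∈ bpmf ∧ ws.getD 1 0 ∈ iwu ∧ ws.getD 2 0 ∈ aouh ∧ ws.getD 3 0 ∈ tone then true
  else false

-- ===== PORT B =====
-- the loop body of Source B: filter/advance the still-viable requirement lists by one ordinal
def zhStep (o : Int) (reqs : List (List (List Int))) : List (List (List Int)) :=
  reqs.filterMap (fun r =>
    match r with
    | [] => none
    | cls :: rest => if o ∈ cls then some rest else none)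

-- literal transliteration of Source B: requirement table, one pass, accept iff some list is exhausted
def IsZhInput_alt (words : String) : Bool :=
  let bpmf : List Int := [49, 113, 97, 122, 50, 119, 115, 120, 101, 100, 99, 114, 102, 118, 53, 116, 103, 98, 121, 104, 110]
  let iwu : List Int := [117, 106, 109]
  let aouh : List Int := [56, 105, 107, 44, 57, 111, 108, 46, 48, 112, 59, 47]
  let tone : List Int := [32, 54, 51, 52, 55]
  let len2 : List Int := [53, 116, 103, 98, 121, 104, 110, 117, 106, 109, 56, 105, 107, 44, 57, 111, 108, 46, 48, 112, 59, 45]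
  let init : List (List (List Int)) :=
    [[len2, tone], [bpmf, iwu ++ aouh, tone], [iwu, aouh, tone], [bpmf, iwu, aouh, tone]]
  let final := words.toList.foldl (fun reqs c => zhStep (c.toNat : Int) reqs) init
  final.any (fun r => r.isEmpty)

-- ===== PRECONDITION & SPEC =====
def Spec_IsZhInput (words : String) (out : Bool) : Prop := out = IsZhInput_alt words
instance (words : String) (out : Bool) : Decidable (Spec_IsZhInput words out) := by unfold Spec_IsZhInput; infer_instance

-- ===== CLAIM (what is proved, stated in full; the proofs are below) =====
def Claim_equal_IsZhInput : Prop := ∀ (words : String), Dom_IsZhInput words → Spec_IsZhInput words (IsZhInput words)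

-- ===== LEMMAS AND PROOFS =====

-- a word (as ordinals) matches one requirement list position by position
def zhMatch : List Int → List (List Int) → Bool
  | [], [] => true
  | o :: os, c :: cs => decide (o ∈ c) && zhMatch os cs
  | _, _ => false

lemma any_ext {α : Type} (l : List α) (p q : α → Bool) (h : ∀ a, p a = q a) :
    l.any p = l.any q := by
  induction l with
  | nil => rfl
  | cons a t ih => simp [h, ih]

lemma any_zhStep (o : Int) (p : List (List Int) → Bool) :
    ∀ reqs : List (List (List Int)),
      (zhStep o reqs).any p
        = reqs.any (fun r => match r with
            | [] => false
            | c :: rest => decide (o ∈ c) && p rest) := by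
  intro reqs
  induction reqs with
  | nil => rfl
  | cons r rs ih =>
    cases r with
    | nil => simpa [zhStep, List.filterMap_cons] using ih
    | cons c rest =>
      simp only [zhStep] at ih ⊢
      by_cases h : o ∈ c <;> simp [h, ih]

-- the one-pass NFA simulation accepts iff some requirement list matches the word
lemma any_foldl_zhStep (l : List Char) :
    ∀ reqs : List (List (List Int)),
      ((l.foldl (fun reqs c => zhStep ((c.toNat : Int)) reqs) reqs).any (fun r => r.isEmpty))
        = reqs.any (fun r => zhMatch (l.map (fun c => (c.toNat : Int))) r) := by
  induction l with
  | nil =>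
    intro reqs
    simp only [List.foldl_nil, List.map_nil]
    refine any_ext _ _ _ (fun r => ?_)
    cases r <;> simp [zhMatch]
  | cons a t ih =>
    intro reqs
    simp only [List.foldl_cons, List.map_cons]
    rw [ih, any_zhStep]
    refine any_ext _ _ _ (fun r => ?_)
    cases r <;> simp [zhMatch]

-- ===== VERDICT (by name: the statement is the Claim_ definition above) =====
theorem IsZhInput_spec : Claim_equal_IsZhInput := by
  intro words _
  unfold Spec_IsZhInput IsZhInput IsZhInput_alt
  rw [any_foldl_zhStep]
  simp only [List.any_cons, List.any_nil]
  generalize words.toList = cs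
  match cs with
  | [] => decide
  | [a] => simp [zhMatch]
  | [a, b] => simp [zhMatch]
  | [a, b, c] => simp [zhMatch]
  | [a, b, c, d] => simp [zhMatch]
  | a :: b :: c :: d :: e :: t => simp [zhMatch]
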